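-- pv_equiv track=rewrite | github.com/Better-Politics-Mod/Better-Politics-Mod-Vic-3 | support-scripts/cabinet/CABGENSCRIPT.py | gen_add_fstr
-- ===== SOURCE A (Python) =====
-- def gen_add_fstr(modtoig, dynamic_modifiers, nm):
--     add_fstr = """
-- bpm_reload_institution_modifiers_XXX = {
--     institution:institution_XXX = {
--         bpm_remove_institution_modifiers_XXX = yes
--     }
--     if = {
--         limit = {
--             var:bpm_is_institution_XXX ?= {
--                 OR = {
--                     is_character_alive = no
--                     NOT = { exists = interest_group }
--                 }
--             }
--         }
--         remove_variable = bpm_is_institution_XXX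
--     }
--     if = {
--         limit = {
--             has_variable = bpm_is_institution_XXX
--         }
--         var:bpm_is_institution_XXX.interest_group = {
-- """.replace('XXX', nm)
--     for mod, igs in modtoig.items():
--         if mod == "": continue
--         if len(igs) == 1:
--             add_fstr += "           bpm_reload_modifier_inst_singlet = {"
--             add_fstr +=f"""
--                 IG1 = {igs[0]}
--                 INST = {nm}
--                 MOD = bpm_{nm}_{mod}_modifier
-- """
--         if len(igs) == 2:
--             add_fstr += "           bpm_reload_modifier_inst_doublet = {"
--             add_fstr +=f"""
--                 IG1 = {igs[0]}
--                 IG2 = {igs[1]}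
--                 INST = {nm}
--                 MOD = bpm_{nm}_{mod}_modifier
-- """
--         if len(igs) == 3:
--             add_fstr += "           bpm_reload_modifier_inst_triplet = {"
--             add_fstr +=f"""
--                 IG1 = {igs[0]}
--                 IG2 = {igs[1]}
--                 IG3 = {igs[2]}
--                 INST = {nm}
--                 MOD = bpm_{nm}_{mod}_modifier
-- """
--         add_fstr += '           }\n'
--
--     add_fstr += """
--             add_modifier = {
--                 name = bpm_XXX_attraction_modifier
--                 multiplier = institution:institution_XXX.investment
--             }
--         }
-- """.replace('XXX', nm)
--     add_fstr += """    }
-- }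
-- """
--     return add_fstr
-- ===== SOURCE B (Python) =====
-- _HEADER = """
-- bpm_reload_institution_modifiers_XXX = {
--     institution:institution_XXX = {
--         bpm_remove_institution_modifiers_XXX = yes
--     }
--     if = {
--         limit = {
--             var:bpm_is_institution_XXX ?= {
--                 OR = {
--                     is_character_alive = no
--                     NOT = { exists = interest_group }
--                 }
--             }
--         }
--         remove_variable = bpm_is_institution_XXX
--     }
--     if = {
--         limit = {
--             has_variable = bpm_is_institution_XXX
--         }
--         var:bpm_is_institution_XXX.interest_group = {
-- """
--
-- _FOOTER = """
--             add_modifier = {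
--                 name = bpm_XXX_attraction_modifier
--                 multiplier = institution:institution_XXX.investment
--             }
--         }
-- """
--
-- _SUFFIX = {1: "singlet", 2: "doublet", 3: "triplet"}
--
--
-- def gen_add_fstr(modtoig, dynamic_modifiers, nm):
--     parts = [_HEADER.replace("XXX", nm)]
--     for mod, igs in modtoig.items():
--         if mod == "":
--             continue
--         suffix = _SUFFIX.get(len(igs))
--         if suffix is not None:
--             parts.append("           bpm_reload_modifier_inst_" + suffix + " = {\n")
--             for i, ig in enumerate(igs):
--                 parts.append("                IG" + str(i + 1) + " = " + ig + "\n")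
--             parts.append("                INST = " + nm + "\n")
--             parts.append("                MOD = bpm_" + nm + "_" + mod + "_modifier\n")
--         parts.append("           }\n")
--     parts.append(_FOOTER.replace("XXX", nm))
--     parts.append("    }\n}\n")
--     return "".join(parts)
-- ===== Notes on version B (the rewrite author's own statement) =====
-- stated objective: simpler
-- what changed: Replaces A's three copy-pasted len(igs)==k string-building branches with a single length-to-suffix lookup table plus one enumerate loop emitting the IGk lines, collecting all pieces in a list that is joined once at the end instead of repeated string +=.
import Mathlib
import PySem

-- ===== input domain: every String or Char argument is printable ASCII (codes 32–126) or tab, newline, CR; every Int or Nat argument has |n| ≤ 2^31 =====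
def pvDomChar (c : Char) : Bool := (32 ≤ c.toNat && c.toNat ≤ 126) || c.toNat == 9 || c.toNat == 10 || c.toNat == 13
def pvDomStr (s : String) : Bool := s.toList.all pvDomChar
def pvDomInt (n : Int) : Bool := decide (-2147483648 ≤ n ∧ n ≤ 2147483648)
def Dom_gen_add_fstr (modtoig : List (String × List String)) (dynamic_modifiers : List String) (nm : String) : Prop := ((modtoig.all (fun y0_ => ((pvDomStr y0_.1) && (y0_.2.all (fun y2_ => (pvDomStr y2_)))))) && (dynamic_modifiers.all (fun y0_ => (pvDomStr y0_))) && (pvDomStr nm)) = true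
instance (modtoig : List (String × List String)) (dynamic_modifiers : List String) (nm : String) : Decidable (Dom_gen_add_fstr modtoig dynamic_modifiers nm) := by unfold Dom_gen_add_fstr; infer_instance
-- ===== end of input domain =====

-- B replaces A's three copy-pasted length branches by a length→suffix lookup table plus one
-- enumerate loop over igs, collecting the pieces in a list joined once at the end (objective: simpler).

-- ===== PORT A =====
-- body of A's 'for mod, igs in modtoig.items():' loop (one iteration, acc = add_fstr so far)
def pvStepA (nm : String) (acc : String) (e : String × List String) : String :=
  let mod := e.1
  let igs := e.2
  if mod = "" then acc else
  let acc := if igs.length = 1 then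
      acc ++ "           bpm_reload_modifier_inst_singlet = {"
          ++ ("\n                IG1 = " ++ PySem.List.pyGetD igs 0 ""
              ++ "\n                INST = " ++ nm
              ++ "\n                MOD = bpm_" ++ nm ++ "_" ++ mod ++ "_modifier\n")
    else acc
  let acc := if igs.length = 2 then
      acc ++ "           bpm_reload_modifier_inst_doublet = {"
          ++ ("\n                IG1 = " ++ PySem.List.pyGetD igs 0 ""
              ++ "\n                IG2 = " ++ PySem.List.pyGetD igs 1 ""
              ++ "\n                INST = " ++ nm
              ++ "\n                MOD = bpm_" ++ nm ++ "_" ++ mod ++ "_modifier\n")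
    else acc
  let acc := if igs.length = 3 then
      acc ++ "           bpm_reload_modifier_inst_triplet = {"
          ++ ("\n                IG1 = " ++ PySem.List.pyGetD igs 0 ""
              ++ "\n                IG2 = " ++ PySem.List.pyGetD igs 1 ""
              ++ "\n                IG3 = " ++ PySem.List.pyGetD igs 2 ""
              ++ "\n                INST = " ++ nm
              ++ "\n                MOD = bpm_" ++ nm ++ "_" ++ mod ++ "_modifier\n")
    else acc
  acc ++ "           }\n"

def gen_add_fstr (modtoig : List (String × List String)) (dynamic_modifiers : List String) (nm : String) : String :=
  let add_fstr := PySem.Str.replace "\nbpm_reload_institution_modifiers_XXX = {\n    institution:institution_XXX = {\n        bpm_remove_institution_modifiers_XXX = yes\n    }\n    if = {\n        limit = {\n            var:bpm_is_institution_XXX ?= {\n                OR = {\n                    is_character_alive = no\n                    NOT = { exists = interest_group } \n                }\n            }\n        }\n        remove_variable = bpm_is_institution_XXX\n    }\n    if = {\n        limit = {\n            has_variable = bpm_is_institution_XXX\n        }\n        var:bpm_is_institution_XXX.interest_group = {\n" "XXX" nm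
  let add_fstr := modtoig.foldl (pvStepA nm) add_fstr
  add_fstr
    ++ PySem.Str.replace "\n            add_modifier = {\n                name = bpm_XXX_attraction_modifier\n                multiplier = institution:institution_XXX.investment\n            }\n        }\n" "XXX" nm
    ++ "    }\n}\n"

-- ===== PORT B =====
-- Source B module constants
def pvHeaderTpl : String := "\nbpm_reload_institution_modifiers_XXX = {\n    institution:institution_XXX = {\n        bpm_remove_institution_modifiers_XXX = yes\n    }\n    if = {\n        limit = {\n            var:bpm_is_institution_XXX ?= {\n                OR = {\n                    is_character_alive = no\n                    NOT = { exists = interest_group } \n                }\n            }\n        }\n        remove_variable = bpm_is_institution_XXX\n    }\n    if = {\n        limit = {\n            has_variable = bpm_is_institution_XXX\n        }\n        var:bpm_is_institution_XXX.interest_group = {\n"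
def pvFooterTpl : String := "\n            add_modifier = {\n                name = bpm_XXX_attraction_modifier\n                multiplier = institution:institution_XXX.investment\n            }\n        }\n"
def pvSuffixTbl : PySem.Dict Int String := PySem.Dict.ofList [(1, "singlet"), (2, "doublet"), (3, "triplet")]

-- body of B's 'for mod, igs in modtoig.items():' loop (one iteration, over the parts list)
def pvStepB (nm : String) (parts : List String) (e : String × List String) : List String :=
  let mod := e.1
  let igs := e.2
  if mod = "" then parts else
  let suffix := PySem.Dict.get? pvSuffixTbl (igs.length : Int)
  let parts :=
    match suffix with
    | some sfx =>
      let parts := parts ++ ["           bpm_reload_modifier_inst_" ++ sfx ++ " = {\n"]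
      let parts := (PySem.List.enumerate igs).foldl (fun parts p =>
          parts ++ ["                IG" ++ PySem.Int.toStr (p.1 + 1) ++ " = " ++ p.2 ++ "\n"]) parts
      let parts := parts ++ ["                INST = " ++ nm ++ "\n"]
      parts ++ ["                MOD = bpm_" ++ nm ++ "_" ++ mod ++ "_modifier\n"]
    | none => parts
  parts ++ ["           }\n"]

def gen_add_fstr_alt (modtoig : List (String × List String)) (dynamic_modifiers : List String) (nm : String) : String :=
  let parts : List String := [PySem.Str.replace pvHeaderTpl "XXX" nm]
  let parts := modtoig.foldl (pvStepB nm) parts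
  let parts := parts ++ [PySem.Str.replace pvFooterTpl "XXX" nm]
  let parts := parts ++ ["    }\n}\n"]
  PySem.Str.join "" parts

-- ===== PRECONDITION & SPEC =====
def Spec_gen_add_fstr (modtoig : List (String × List String)) (dynamic_modifiers : List String) (nm : String) (out : String) : Prop := out = gen_add_fstr_alt modtoig dynamic_modifiers nm
instance (modtoig : List (String × List String)) (dynamic_modifiers : List String) (nm : String) (out : String) : Decidable (Spec_gen_add_fstr modtoig dynamic_modifiers nm out) := by unfold Spec_gen_add_fstr; infer_instance

-- ===== CLAIM (what is proved, stated in full; the proofs are below) =====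
def Claim_equal_gen_add_fstr : Prop := ∀ (modtoig : List (String × List String)) (dynamic_modifiers : List String) (nm : String), Dom_gen_add_fstr modtoig dynamic_modifiers nm → Spec_gen_add_fstr modtoig dynamic_modifiers nm (gen_add_fstr modtoig dynamic_modifiers nm)

-- ===== LEMMAS AND PROOFS =====

-- "".join distributes over cons / append
theorem pvJoin_cons (p : String) (ps : List String) :
    PySem.Str.join "" (p :: ps) = p ++ PySem.Str.join "" ps := by
  rw [← String.toList_inj]
  simp [PySem.Str.join, PySem.Chars.join, List.intercalate]
  induction ps with
  | nil => simp
  | cons q qs ih => simp_all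

theorem pvJoin_nil : PySem.Str.join "" ([] : List String) = "" := by decide

theorem pvJoin_append (xs ys : List String) :
    PySem.Str.join "" (xs ++ ys) = PySem.Str.join "" xs ++ PySem.Str.join "" ys := by
  induction xs with
  | nil => simp [pvJoin_nil]
  | cons x xs ih => simp [pvJoin_cons, ih, String.append_assoc]

-- the pieces B emits for one dict entry
def pvEntry (nm mod : String) (igs : List String) : List String :=
  if mod = "" then [] else
  (match PySem.Dict.get? pvSuffixTbl (igs.length : Int) with
   | some sfx =>
     ["           bpm_reload_modifier_inst_" ++ sfx ++ " = {\n"]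
       ++ (PySem.List.enumerate igs).map
            (fun p => "                IG" ++ PySem.Int.toStr (p.1 + 1) ++ " = " ++ p.2 ++ "\n")
       ++ ["                INST = " ++ nm ++ "\n"]
       ++ ["                MOD = bpm_" ++ nm ++ "_" ++ mod ++ "_modifier\n"]
   | none => []) ++ ["           }\n"]

theorem pvFlattenSingleton {α β : Type} (f : α → β) (l : List α) :
    (l.map (fun x => [f x])).flatten = l.map f := by
  induction l <;> simp_all

-- B's loop body appends exactly pvEntry
theorem pvStepB_eq (nm : String) (parts : List String) (e : String × List String) :
    pvStepB nm parts e = parts ++ pvEntry nm e.1 e.2 := by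
  by_cases h : e.1 = "" <;> simp [pvStepB, pvEntry, h]
  cases hs : PySem.Dict.get? pvSuffixTbl ((e.2.length : Int)) with
  | none => simp
  | some sfx =>
    simp [PySem.List.foldl_append_singleton_eq_map, List.append_assoc, pvFlattenSingleton]

theorem pvFoldB (nm : String) (l : List (String × List String)) (parts : List String) :
    l.foldl (pvStepB nm) parts = parts ++ l.flatMap (fun e => pvEntry nm e.1 e.2) := by
  induction l generalizing parts with
  | nil => simp
  | cons e l ih =>
    rw [List.foldl_cons, List.flatMap_cons, pvStepB_eq, ih, List.append_assoc]

theorem pvTbl0 : PySem.Dict.get? pvSuffixTbl 0 = none := by decide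
theorem pvTbl1 : PySem.Dict.get? pvSuffixTbl 1 = some "singlet" := by decide
theorem pvTbl2 : PySem.Dict.get? pvSuffixTbl 2 = some "doublet" := by decide
theorem pvTbl3 : PySem.Dict.get? pvSuffixTbl 3 = some "triplet" := by decide

theorem pvToStr1 : PySem.Int.toStr 1 = "1" := by decide
theorem pvToStr2 : PySem.Int.toStr 2 = "2" := by decide
theorem pvToStr3 : PySem.Int.toStr 3 = "3" := by decide

-- A's loop body appends the join of pvEntry
set_option maxRecDepth 8000 in
theorem pvStepA_eq (nm acc : String) (e : String × List String) :
    pvStepA nm acc e = acc ++ PySem.Str.join "" (pvEntry nm e.1 e.2) := by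
  by_cases h : e.1 = ""
  · simp [pvStepA, pvEntry, h, pvJoin_nil]
  · obtain ⟨mod, igs⟩ := e
    simp only at h
    match igs with
    | [] =>
      simp [pvStepA, pvEntry, h, pvTbl0, pvJoin_cons, pvJoin_nil]
    | [a] =>
      simp [pvStepA, pvEntry, h, pvTbl1, PySem.List.enumerate,
            pvJoin_cons, pvJoin_nil, pvToStr1]
      rw [← String.toList_inj]; simp [PySem.List.pyGetD, PySem.List.pyIdx?]
    | [a, b] =>
      simp [pvStepA, pvEntry, h, pvTbl2, PySem.List.enumerate,
            pvJoin_cons, pvJoin_nil, pvToStr1, pvToStr2]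
      rw [← String.toList_inj]; simp [PySem.List.pyGetD, PySem.List.pyIdx?]
    | [a, b, c] =>
      simp [pvStepA, pvEntry, h, pvTbl3, PySem.List.enumerate,
            pvJoin_cons, pvJoin_nil, pvToStr1, pvToStr2, pvToStr3]
      rw [← String.toList_inj]; simp [PySem.List.pyGetD, PySem.List.pyIdx?]
    | a :: b :: c :: d :: t =>
      have h4 : (a :: b :: c :: d :: t).length = t.length + 4 := by simp
      have hg : PySem.Dict.get? pvSuffixTbl ((t.length : Int) + 4) = none := by
        simp [pvSuffixTbl, PySem.Dict.ofList, PySem.Dict.get?]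
        have hit : (PySem.Dict.empty.update [((1:Int), "singlet"), (2, "doublet"), (3, "triplet")]).items
             = [((1:Int), "singlet"), (2, "doublet"), (3, "triplet")] := by decide
        rw [hit]
        intro x y hxy
        simp at hxy
        rcases hxy with ⟨h1,_⟩|⟨h1,_⟩|⟨h1,_⟩ <;> omega
      simp [pvStepA, pvEntry, h, h4, hg]
      rw [← String.toList_inj]; simp [PySem.List.pyGetD, PySem.List.pyIdx?]

theorem pvFoldA (nm : String) (l : List (String × List String)) (acc : String) :
    l.foldl (pvStepA nm) acc = acc ++ PySem.Str.join "" (l.flatMap (fun e => pvEntry nm e.1 e.2)) := by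
  induction l generalizing acc with
  | nil => simp [pvJoin_nil]
  | cons e l ih =>
    rw [List.foldl_cons, pvStepA_eq, ih, List.flatMap_cons, pvJoin_append, String.append_assoc]

-- ===== VERDICT (by name: the statement is the Claim_ definition above) =====
theorem gen_add_fstr_spec : Claim_equal_gen_add_fstr := by
  intro modtoig dynamic_modifiers nm _
  show _ = _
  simp only [gen_add_fstr, gen_add_fstr_alt]
  rw [pvFoldA, pvFoldB, pvHeaderTpl, pvFooterTpl]
  simp [pvJoin_append, pvJoin_cons, pvJoin_nil, String.append_assoc]
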